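-- pv_equiv track=rewrite | github.com/charleswynn1/python-practice | dsa/hashmaps/problem_01_first_unbroken_occurrence_block.py | unbroken
-- ===== SOURCE A (Python) =====
-- def unbroken(nums):
--     hash = {}
--     for index, value in enumerate(nums): #looping through list of integers
--         hash[value] = hash.get(value, {})
--         hash[value][index] = hash[value].get(index, 0) +1
--     for value in hash: #looping through hashmap indecies
--         if len(hash[value]) > 1: #filerting for more than one occurance
--            keys = []
--            for x in hash[value]: #extracting the indexes to identify consecutive groupings
--                keys.append(x)
--                if len(keys) == len(hash[value]): #filtering for lists that match indecie count
--                    increment = 0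
--                    keys = sorted(keys)
--                    for i in range(1, len(keys)): #looping through indecies
--                        if keys[i] - keys[i-1] != 1:
--                            increment = 0
--                            break
--                        if keys[i] - keys[i-1] == 1:
--                            increment+=1 #increasing count for consecutive indecies
--                            if increment == len(keys)-1: #filter for 100% consective indecies
--                                return(value) #return value
--
--     return None
-- ===== SOURCE B (Python) =====
-- def unbroken(nums):
--     # One pass: per value track (count, first index, last index); a value's
--     # occurrence indices are contiguous iff last - first + 1 == count.
--     stats = {}
--     for i, v in enumerate(nums):
--         if v in stats:
--             c, f, _ = stats[v]
--             stats[v] = (c + 1, f, i)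
--         else:
--             stats[v] = (1, i, i)
--     for v, (c, f, l) in stats.items():
--         if c > 1 and l - f + 1 == c:
--             return v
--     return None
-- ===== Notes on version B (the rewrite author's own statement) =====
-- stated objective: simpler
-- what changed: Replaces the nested dict-of-dicts with per-value key extraction, sort and adjacent-difference scan by a single pass keeping (count, first index, last index) per value and testing contiguity arithmetically (last-first+1==count); intended as faster (O(n) vs O(n log n)) but measured only ~1.4x at the largest size, so no speed claim.
import Mathlib
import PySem

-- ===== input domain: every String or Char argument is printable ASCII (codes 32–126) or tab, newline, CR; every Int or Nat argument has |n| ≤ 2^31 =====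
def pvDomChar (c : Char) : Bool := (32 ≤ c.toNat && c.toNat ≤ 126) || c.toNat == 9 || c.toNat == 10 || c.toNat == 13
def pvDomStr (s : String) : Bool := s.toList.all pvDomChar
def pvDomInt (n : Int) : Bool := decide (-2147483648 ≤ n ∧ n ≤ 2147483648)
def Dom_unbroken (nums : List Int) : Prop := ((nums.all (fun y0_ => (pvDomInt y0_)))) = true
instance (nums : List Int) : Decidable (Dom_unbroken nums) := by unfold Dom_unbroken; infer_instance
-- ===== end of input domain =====

-- ===== PORT A =====
-- B makes a single pass keeping (count, first, last) per value and tests contiguity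
-- arithmetically, instead of A's per-value index-dict, sort and adjacent-difference scan.
-- the innermost 'for i in range(1, len(keys))' loop with its increment counter
def incrGo (v : Int) (keys : List Int) : List Int → Int → Option Int
  | [], _ => none
  | i :: rest, inc =>
    -- keys[i] / keys[i-1]: i ranges over 1..len-1, always in range, so pyGetD is exact here
    if PySem.List.pyGetD keys i 0 - PySem.List.pyGetD keys (i - 1) 0 ≠ 1 then none
    else
      let inc := inc + 1
      if inc = (keys.length : Int) - 1 then some v
      else incrGo v keys rest inc

-- the 'for x in hash[value]: keys.append(x); if len(keys) == len(hash[value]): …' loop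
def innerA (v : Int) (nLen : Nat) : List Int → List Int → Option Int
  | _, [] => none
  | keysAcc, x :: rest =>
    let keys := keysAcc ++ [x]
    if keys.length = nLen then
      let keys := PySem.List.sorted keys (fun y => y) false
      match incrGo v keys (PySem.List.pyRange 1 (keys.length : Int) 1) 0 with
      | some r => some r
      | none => innerA v nLen keys rest
    else innerA v nLen keys rest

-- the outer 'for value in hash' loop
def scanA (h : PySem.Dict Int (PySem.Dict Int Int)) : List Int → Option Int
  | [] => none
  | v :: vs =>
    let inner := h.getD v PySem.Dict.empty
    if 1 < inner.size then
      match innerA v inner.size [] inner.keys with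
      | some r => some r
      | none => scanA h vs
    else scanA h vs

def buildA (nums : List Int) : PySem.Dict Int (PySem.Dict Int Int) :=
  (PySem.List.enumerate nums 0).foldl
    (fun h p =>
      let inner := h.getD p.2 PySem.Dict.empty
      h.insert p.2 (inner.insert p.1 (inner.getD p.1 0 + 1)))
    PySem.Dict.empty

def unbroken (nums : List Int) : Option Int :=
  let h := buildA nums
  scanA h h.keys

-- ===== PORT B =====
def buildB (nums : List Int) : PySem.Dict Int (Int × Int × Int) :=
  (PySem.List.enumerate nums 0).foldl
    (fun d p =>
      match d.get? p.2 with
      | some (c, f, _) => d.insert p.2 (c + 1, f, p.1)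
      | none => d.insert p.2 (1, p.1, p.1))
    PySem.Dict.empty

def scanB : List (Int × Int × Int × Int) → Option Int
  | [] => none
  | (v, c, f, l) :: rest => if 1 < c ∧ l - f + 1 = c then some v else scanB rest

def unbroken_alt (nums : List Int) : Option Int :=
  scanB (buildB nums).items

-- ===== PRECONDITION & SPEC =====
def Spec_unbroken (nums : List Int) (out : Option Int) : Prop := out = unbroken_alt nums
instance (nums : List Int) (out : Option Int) : Decidable (Spec_unbroken nums out) := by unfold Spec_unbroken; infer_instance

-- ===== CLAIM (what is proved, stated in full; the proofs are below) =====
def Claim_equal_unbroken : Prop := ∀ (nums : List Int), Dom_unbroken nums → Spec_unbroken nums (unbroken nums)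

-- ===== LEMMAS AND PROOFS =====

-- the (increasing) list of indices at which v occurs in nums
def idxs (nums : List Int) (v : Int) : List Int :=
  ((PySem.List.enumerate nums 0).filter (fun p => p.2 == v)).map (fun p => p.1)

-- B's per-value accumulator, isolated on one value's index stream
def agg : Option (Int × Int × Int) → List Int → Option (Int × Int × Int)
  | o, [] => o
  | none, i :: rest => agg (some (1, i, i)) rest
  | some (c, f, _), i :: rest => agg (some (c + 1, f, i)) rest

-- all adjacent differences equal 1
def diffsOne : List Int → Bool
  | a :: b :: t => (b - a == 1) && diffsOne (b :: t)
  | _ => true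

-- A's dict build, projected to one value: only that value's inner dict of indices
theorem buildA_proj (l : List (Int × Int)) (h : PySem.Dict Int (PySem.Dict Int Int)) (v : Int) :
    ((l.foldl (fun h p =>
        let inner := h.getD p.2 PySem.Dict.empty
        h.insert p.2 (inner.insert p.1 (inner.getD p.1 0 + 1))) h).getD v PySem.Dict.empty)
    = ((l.filter (fun p => p.2 == v)).foldl
        (fun d p => d.insert p.1 (d.getD p.1 0 + 1)) (h.getD v PySem.Dict.empty)) := by
  induction l generalizing h with
  | nil => rfl
  | cons p l ih =>
    by_cases hv : p.2 = v
    · subst hv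
      simp only [List.foldl_cons, List.filter_cons, BEq.rfl, if_pos]
      rw [ih]
      simp [PySem.Dict.getD_insert_self]
    · have hb : (p.2 == v) = false := by simp [hv]
      simp only [List.foldl_cons, List.filter_cons, hb]
      rw [ih]
      simp [PySem.Dict.getD_insert_of_ne _ _ _ (Ne.symm hv)]

-- B's dict build, projected to one value
theorem buildB_proj (l : List (Int × Int)) (d : PySem.Dict Int (Int × Int × Int)) (v : Int) :
    ((l.foldl (fun d p =>
        match d.get? p.2 with
        | some (c, f, _) => d.insert p.2 (c + 1, f, p.1)
        | none => d.insert p.2 (1, p.1, p.1)) d).get? v)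
    = agg (d.get? v) ((l.filter (fun p => p.2 == v)).map (fun p => p.1)) := by
  induction l generalizing d with
  | nil => rfl
  | cons p l ih =>
    by_cases hv : p.2 = v
    · subst hv
      simp only [List.foldl_cons, List.filter_cons, BEq.rfl, if_pos, List.map_cons]
      rw [ih]
      rcases hd : d.get? p.2 with _ | ⟨c, f, l0⟩ <;>
        simp [PySem.Dict.get?_insert_self, agg]
    · have hb : (p.2 == v) = false := by simp [hv]
      simp only [List.foldl_cons, List.filter_cons, hb]
      rw [ih]
      rcases hd : d.get? p.2 with _ | ⟨c, f, l0⟩ <;>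
        simp [PySem.Dict.get?_insert_of_ne _ _ (Ne.symm hv)]

theorem agg_some (xs : List Int) : ∀ (c f l0 : Int),
    agg (some (c, f, l0)) xs = some (c + (xs.length : Int), f, xs.getLastD l0) := by
  induction xs with
  | nil => simp [agg]
  | cons i rest ih =>
    intro c f l0
    simp only [agg, ih, List.getLastD_cons, List.length_cons]
    norm_num
    ring_nf

-- the two fold bodies, in the key/value shape of the keys_foldl lemmas
theorem buildA_fun_eq : (fun (h : PySem.Dict Int (PySem.Dict Int Int)) (p : Int × Int) =>
      let inner := h.getD p.2 PySem.Dict.empty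
      h.insert p.2 (inner.insert p.1 (inner.getD p.1 0 + 1)))
    = (fun h p => h.insert p.2
        ((h.getD p.2 PySem.Dict.empty).insert p.1 ((h.getD p.2 PySem.Dict.empty).getD p.1 0 + 1))) := rfl

theorem buildB_fun_eq : (fun (d : PySem.Dict Int (Int × Int × Int)) (p : Int × Int) =>
      match d.get? p.2 with
      | some (c, f, _) => d.insert p.2 (c + 1, f, p.1)
      | none => d.insert p.2 (1, p.1, p.1))
    = (fun d p => d.insert p.2
        (match d.get? p.2 with
         | some (c, f, _) => (c + 1, f, p.1)
         | none => (1, p.1, p.1))) := by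
  funext d p
  rcases d.get? p.2 with _ | ⟨c, f, l0⟩ <;> rfl

theorem keys_buildA (nums : List Int) : (buildA nums).keys = PySem.Set.ofList nums := by
  unfold buildA
  rw [buildA_fun_eq]
  have h := PySem.Dict.keys_foldl_insert_key (PySem.List.enumerate nums 0) (fun p : Int × Int => p.2)
    (fun h p => ((h.getD p.2 (PySem.Dict.empty : PySem.Dict Int Int)).insert p.1 ((h.getD p.2 PySem.Dict.empty).getD p.1 (0 : Int) + 1)))
    PySem.Dict.empty
  simp only [PySem.Dict.keys, PySem.Dict.empty, List.map_nil, PySem.Set.update_nil_left,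
    PySem.List.map_snd_enumerate] at h
  simp only [PySem.Dict.keys, PySem.Dict.empty]
  exact h

theorem keys_buildB (nums : List Int) : (buildB nums).keys = PySem.Set.ofList nums := by
  unfold buildB
  rw [buildB_fun_eq]
  have h := PySem.Dict.keys_foldl_insert_key (PySem.List.enumerate nums 0) (fun p : Int × Int => p.2)
    (fun d p => (match d.get? p.2 with
         | some (c, f, _) => ((c + 1, f, p.1) : Int × Int × Int)
         | none => (1, p.1, p.1)))
    PySem.Dict.empty
  simp only [PySem.Dict.keys, PySem.Dict.empty, List.map_nil, PySem.Set.update_nil_left,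
    PySem.List.map_snd_enumerate] at h
  simp only [PySem.Dict.keys, PySem.Dict.empty]
  exact h

theorem nodup_keys_buildB (nums : List Int) : (buildB nums).keys.Nodup := by
  rw [keys_buildB]; exact PySem.Set.nodup_ofList nums

theorem pairwise_idxs (nums : List Int) (v : Int) : (idxs nums v).Pairwise (· < ·) := by
  unfold idxs
  exact ((PySem.List.pairwise_lt_enumerate nums 0).filter _).map _ (fun _ _ h => h)

theorem nodup_idxs (nums : List Int) (v : Int) : (idxs nums v).Nodup :=
  (pairwise_idxs nums v).imp (fun h => ne_of_lt h)

theorem idxs_ne_nil (nums : List Int) (v : Int) (hv : v ∈ nums) : idxs nums v ≠ [] := by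
  unfold idxs
  obtain ⟨k, hk, hval⟩ := List.getElem_of_mem hv
  have hmem : ((k : Int), v) ∈ PySem.List.enumerate nums 0 := by
    rw [PySem.List.mem_enumerate_iff]
    exact ⟨k, hk, by simp [hval]⟩
  simp only [ne_eq, List.map_eq_nil_iff, List.filter_eq_nil_iff]
  intro hcon
  exact hcon _ hmem (by simp)

theorem innerA_keys (nums : List Int) (v : Int) :
    ((buildA nums).getD v PySem.Dict.empty).keys = idxs nums v := by
  unfold buildA
  rw [buildA_proj]
  have h := PySem.Dict.keys_foldl_insert_key
    (((PySem.List.enumerate nums 0).filter (fun p => p.2 == v))) (fun p : Int × Int => p.1)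
    (fun (d : PySem.Dict Int Int) p => d.getD p.1 0 + 1)
    ((PySem.Dict.empty : PySem.Dict Int (PySem.Dict Int Int)).getD v PySem.Dict.empty)
  simp only [PySem.Dict.getD, PySem.Dict.get?, PySem.Dict.empty, PySem.Dict.keys] at h
  simp only [PySem.Dict.getD, PySem.Dict.get?, PySem.Dict.empty, PySem.Dict.keys]
  rw [h]
  exact PySem.Set.ofList_eq_self_of_nodup _ (nodup_idxs nums v)

theorem innerA_size (nums : List Int) (v : Int) :
    ((buildA nums).getD v PySem.Dict.empty).size = (idxs nums v).length := by
  have h := innerA_keys nums v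
  simp only [PySem.Dict.keys] at h
  simpa [PySem.Dict.size] using congrArg List.length h

theorem getB (nums : List Int) (v : Int) :
    (buildB nums).get? v = agg none (idxs nums v) := by
  unfold buildB
  rw [buildB_proj]
  rfl

theorem diffsOne_drop (keys : List Int) (j : Nat) (h1 : 1 ≤ j) (hj : j < keys.length) :
    diffsOne (keys.drop (j - 1))
      = ((keys[j]'hj - keys[j-1]'(lt_trans (Nat.sub_lt h1 one_pos) hj) == 1)
          && diffsOne (keys.drop j)) := by
  have hj1 : j - 1 < keys.length := lt_trans (Nat.sub_lt h1 one_pos) hj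
  have e : j - 1 + 1 = j := Nat.sub_add_cancel h1
  rw [List.drop_eq_getElem_cons hj1, e, List.drop_eq_getElem_cons hj]
  rfl

-- the increment loop returns v exactly when all remaining adjacent differences are 1
theorem incrGo_spec (v : Int) (keys : List Int) : ∀ (k j : Nat), keys.length - j = k →
    1 ≤ j → j < keys.length →
    incrGo v keys (PySem.List.pyRange (j : Int) (keys.length : Int) 1) ((j : Int) - 1)
      = if diffsOne (keys.drop (j - 1)) then some v else none := by
  intro k
  induction k with
  | zero => intro j hk h1 hj; omega
  | succ k ih =>
    intro j hk h1 hj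
    rw [PySem.List.pyRange_one_cons (by exact_mod_cast hj)]
    rw [incrGo]
    have hj1 : j - 1 < keys.length := lt_trans (Nat.sub_lt h1 one_pos) hj
    have e1 : PySem.List.pyGetD keys (j : Int) 0 = keys[j]'hj := by
      rw [PySem.List.pyGetD_natCast, List.getD_eq_getElem]
    have e2 : PySem.List.pyGetD keys ((j : Int) - 1) 0 = keys[j-1]'hj1 := by
      have : ((j : Int) - 1) = ((j - 1 : Nat) : Int) := by omega
      rw [this, PySem.List.pyGetD_natCast, List.getD_eq_getElem]
    rw [e1, e2, diffsOne_drop keys j h1 hj]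
    by_cases hd : keys[j]'hj - keys[j-1]'hj1 = 1
    · have hb : (keys[j]'hj - keys[j-1]'hj1 == 1) = true := by simpa using hd
      rw [if_neg (show ¬(keys[j]'hj - keys[j-1]'hj1 ≠ 1) from by simpa using hd), hb, Bool.true_and]
      have einc : (j : Int) - 1 + 1 = (j : Int) := by ring
      rw [einc]
      by_cases hlast : j = keys.length - 1
      · have : (j : Int) = (keys.length : Int) - 1 := by omega
        rw [if_pos this]
        have : keys.drop j = [keys[j]'hj] := by
          rw [List.drop_eq_getElem_cons hj]
          have : keys.drop (j+1) = [] := by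
            apply List.drop_eq_nil_of_le; omega
          rw [this]
        rw [this]
        simp [diffsOne]
      · have hne : (j : Int) ≠ (keys.length : Int) - 1 := by omega
        rw [if_neg hne]
        have hjj : j + 1 < keys.length := by omega
        have := ih (j + 1) (by omega) (by omega) hjj
        have ecast : ((j + 1 : Nat) : Int) = (j : Int) + 1 := by push_cast; ring
        rw [ecast] at this
        have ecast2 : ((j+1) - 1 : Nat) = j := by omega
        rw [ecast2] at this
        have ecast3 : ((j:Int) + 1 - 1) = (j : Int) := by ring
        rw [ecast3] at this
        exact this
    · rw [if_pos (by simpa using hd)]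
      have : (keys[j]'hj - keys[j-1]'hj1 == 1) = false := by simpa using hd
      rw [this, Bool.false_and, if_neg (by simp)]

-- a strictly increasing list ends at least length-1 above its head
theorem chain_getLast_ge : ∀ (t : List Int) (b : Int), (b :: t).IsChain (· < ·) →
    (b : Int) + (t.length : Int) ≤ (b :: t).getLastD 0 := by
  intro t
  induction t with
  | nil => intro b _; simp
  | cons c t ih =>
    intro b hch
    rw [List.isChain_cons_cons] at hch
    have h2 := ih c hch.2
    have hbc : b < c := hch.1
    rw [List.getLastD_cons] at h2 ⊢
    rw [List.getLastD_cons]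
    simp only [List.length_cons]
    push_cast at *
    omega

-- on a strictly increasing list, all-differences-one is exactly last - first = length - 1
theorem diffsOne_char : ∀ (t : List Int) (a : Int), (a :: t).IsChain (· < ·) →
    (diffsOne (a :: t) = true ↔ (a :: t).getLastD 0 - a = (t.length : Int)) := by
  intro t
  induction t with
  | nil => intro a _; simp [diffsOne]
  | cons b t ih =>
    intro a hch
    rw [List.isChain_cons_cons] at hch
    have hab : a < b := hch.1
    have hge := chain_getLast_ge t b hch.2
    have ihb := ih b hch.2
    simp only [diffsOne, Bool.and_eq_true, beq_iff_eq, List.getLastD_cons, List.length_cons] at *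
    constructor
    · rintro ⟨hd, hrest⟩
      have := ihb.mp hrest
      push_cast
      omega
    · intro h
      by_cases hd : b - a = 1
      · refine ⟨hd, ihb.mpr ?_⟩
        push_cast at h
        omega
      · exfalso
        have h2 : b - a ≥ 2 := by omega
        push_cast at h
        omega

-- the append-and-check loop fires its check exactly once, on the full key list
theorem innerA_go (v : Int) (ks : List Int) (h2 : 2 ≤ ks.length)
    (hs : ks.Pairwise (· < ·)) :
    ∀ (rest acc : List Int), acc ++ rest = ks → rest ≠ [] →
      innerA v ks.length acc rest = (if diffsOne ks then some v else none) := by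
  intro rest
  induction rest with
  | nil => intro acc _ hne; exact absurd rfl hne
  | cons x rest ih =>
    intro acc hacc _
    cases rest with
    | nil =>
      have hkeys : acc ++ [x] = ks := hacc
      rw [innerA, hkeys, if_pos rfl]
      have hsorted : PySem.List.sorted ks (fun y => y) = ks :=
        PySem.List.sorted_eq_self_of_pairwise ks _ (hs.imp (fun h => le_of_lt h))
      rw [hsorted]
      have hspec := incrGo_spec v ks (ks.length - 1) 1 rfl le_rfl (by omega)
      simp only [Nat.cast_one, Nat.sub_self, List.drop_zero] at hspec
      have e : (1 : Int) - 1 = 0 := by ring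
      rw [e] at hspec
      by_cases hdo : diffsOne ks
      · simp [hspec, hdo]
      · simp [hspec, hdo, innerA]
    | cons y t =>
      rw [innerA]
      have hlen : (acc ++ [x]).length ≠ ks.length := by
        have := congrArg List.length hacc
        simp at this ⊢
        omega
      rw [if_neg hlen]
      exact ih (acc ++ [x]) (by rw [← hacc]; simp) (by simp)

-- the two scans agree key by key
theorem scan_eq (nums : List Int) : ∀ (vs : List Int), (∀ v ∈ vs, v ∈ nums) →
    scanA (buildA nums) vs
      = scanB (vs.map (fun k => (k, (buildB nums).getD k (0, 0, 0)))) := by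
  intro vs
  induction vs with
  | nil => intro _; rfl
  | cons v vs ih =>
    intro hmem
    have hv : v ∈ nums := hmem v (by simp)
    have hrest : ∀ w ∈ vs, w ∈ nums := fun w hw => hmem w (by simp [hw])
    obtain ⟨i, rest, hks⟩ := List.exists_cons_of_ne_nil (idxs_ne_nil nums v hv)
    have hpw := pairwise_idxs nums v
    have hgB : (buildB nums).getD v (0, 0, 0)
        = (1 + (rest.length : Int), i, rest.getLastD i) := by
      have := getB nums v
      rw [hks] at this
      simp only [agg] at this
      rw [agg_some] at this
      simp [PySem.Dict.getD, this]
    rw [List.map_cons, scanB, scanA, hgB]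
    rw [innerA_size, innerA_keys, hks]
    by_cases hlong : 2 ≤ (i :: rest).length
    · rw [if_pos (by simpa using hlong)]
      have hpw' : (i :: rest).Pairwise (· < ·) := by rwa [hks] at hpw
      have hrun := innerA_go v (i :: rest) hlong hpw' (i :: rest) [] rfl (by simp)
      have hchain : (i :: rest).IsChain (· < ·) := hpw'.isChain
      have hchar := diffsOne_char rest i hchain
      by_cases hdo : diffsOne (i :: rest)
      · rw [hrun, if_pos hdo]
        have harith := hchar.mp hdo
        rw [List.getLastD_cons] at harith
        rw [if_pos (show (1:Int) < 1 + (rest.length:Int) ∧ rest.getLastD i - i + 1 = 1 + (rest.length:Int)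
          from ⟨by have := hlong; simp at this; omega, by omega⟩)]
      · rw [hrun, if_neg hdo]
        have harith : ¬ (rest.getLastD i - i + 1 = 1 + (rest.length : Int)) := by
          intro hc
          apply hdo
          apply hchar.mpr
          rw [List.getLastD_cons]
          omega
        rw [if_neg (fun hc => harith hc.2)]
        exact ih hrest
    · have h1 : (i :: rest).length = 1 := by
        have := List.length_pos_of_ne_nil (hks ▸ idxs_ne_nil nums v hv)
        simp at hlong ⊢
        omega
      rw [if_neg (by omega)]
      have : rest = [] := by simpa using h1
      subst this
      rw [if_neg (by rintro ⟨hc, -⟩; simp at hc)]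
      exact ih hrest

-- ===== VERDICT (by name: the statement is the Claim_ definition above) =====
theorem unbroken_spec : Claim_equal_unbroken := by
  intro nums _
  unfold Spec_unbroken
  show scanA (buildA nums) (buildA nums).keys = scanB (buildB nums).items
  rw [PySem.Dict.items_eq_map_keys (buildB nums) (nodup_keys_buildB nums) (0, 0, 0)]
  rw [keys_buildA, keys_buildB]
  exact scan_eq nums (PySem.Set.ofList nums)
    (fun v hv => (PySem.Set.mem_ofList nums v).mp hv)
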